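-- pv_equiv track=rewrite | github.com/leskin-in/mipt-dmalgo | task6_tatt_laying.py | find_border_cycle
-- ===== SOURCE A (Python) =====
-- def find_border_cycle(graph: list) -> int:
--     """
--     Find a cycle which is a border of some edge
--     :returns: the index of a vertex which is the last vertex in the cycle
--     """
--     cycle = set()
--     cycle_finish_index = -1
--     previous_v = -1
--
--     i = 0
--     while i < len(graph) and cycle_finish_index < 0:
--         cycle.add(i)
--         for v in cycle:
--             if v != previous_v and v in graph[i]:
--                 cycle_finish_index = i
--         previous_v = i
--         i += 1
--
--     return cycle_finish_index
-- ===== SOURCE B (Python) =====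
-- def find_border_cycle(graph: list) -> int:
--     for i, nbrs in enumerate(graph):
--         if any(0 <= w <= i and w != i - 1 for w in nbrs):
--             return i
--     return -1
-- ===== Notes on version B (the rewrite author's own statement) =====
-- stated objective: alternative
-- what changed: Instead of growing a set {0..i} and scanning it with membership tests into graph[i] at every step, B scans each adjacency list once and tests the bound 0 <= w <= i and w != i-1, returning i on the first hit.
import Mathlib
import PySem

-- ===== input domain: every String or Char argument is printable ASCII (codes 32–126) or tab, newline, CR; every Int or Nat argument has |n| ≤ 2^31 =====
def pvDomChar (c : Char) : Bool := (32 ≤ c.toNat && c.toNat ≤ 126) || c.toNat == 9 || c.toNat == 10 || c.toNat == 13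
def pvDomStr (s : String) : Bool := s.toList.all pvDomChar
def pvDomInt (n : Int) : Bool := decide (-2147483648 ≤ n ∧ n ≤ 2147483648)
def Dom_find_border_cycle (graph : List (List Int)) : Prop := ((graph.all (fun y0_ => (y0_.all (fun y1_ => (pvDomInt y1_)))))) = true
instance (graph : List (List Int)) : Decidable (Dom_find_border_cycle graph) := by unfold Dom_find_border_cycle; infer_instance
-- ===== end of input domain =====

-- ===== PORT A =====
-- B replaces A's growing set {0..i} + per-step membership scan with a single pass
-- over each adjacency list, testing a bound on each neighbour instead (objective: alternative).
-- Python's 'for v in cycle' iterates in hash order; the loop's result is order-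
-- independent (every match assigns the same i), so insertion order is exact here.
def pyAInner (graph : List (List Int)) (i : Nat) (prev : Int) (cy : PySem.Set Int) (cfi : Int) : Int :=
  cy.foldl (fun acc v => if v ≠ prev ∧ v ∈ graph.getD i [] then (i : Int) else acc) cfi

def pyALoop (graph : List (List Int)) (cy : PySem.Set Int) (cfi prev : Int) (i : Nat) : Int :=
  if _h : i < graph.length ∧ cfi < 0 then
    let cy' := PySem.Set.add cy (i : Int)
    let cfi' := pyAInner graph i prev cy' cfi
    pyALoop graph cy' cfi' (i : Int) (i + 1)
  else cfi
termination_by graph.length - i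

def find_border_cycle (graph : List (List Int)) : Int :=
  pyALoop graph PySem.Set.empty (-1) (-1) 0

-- ===== PORT B =====
def pyBGo (rest : List (List Int)) (i : Nat) : Int :=
  match rest with
  | [] => -1
  | nbrs :: rest' =>
    if nbrs.any (fun w => decide (0 ≤ w) && decide (w ≤ (i : Int)) && decide (w ≠ (i : Int) - 1)) then (i : Int)
    else pyBGo rest' (i + 1)

def find_border_cycle_alt (graph : List (List Int)) : Int :=
  pyBGo graph 0

-- ===== PRECONDITION & SPEC =====
def Spec_find_border_cycle (graph : List (List Int)) (out : Int) : Prop := out = find_border_cycle_alt graph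
instance (graph : List (List Int)) (out : Int) : Decidable (Spec_find_border_cycle graph out) := by unfold Spec_find_border_cycle; infer_instance

-- ===== CLAIM (what is proved, stated in full; the proofs are below) =====
def Claim_equal_find_border_cycle : Prop := ∀ (graph : List (List Int)), Dom_find_border_cycle graph → Spec_find_border_cycle graph (find_border_cycle graph)

-- ===== LEMMAS AND PROOFS =====

theorem foldl_if_any {P : Int → Prop} [DecidablePred P] (l : List Int) (c a : Int) :
    l.foldl (fun acc v => if P v then c else acc) a
      = if l.any (fun v => decide (P v)) then c else a := by
  induction l generalizing a with
  | nil => simp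
  | cons x xs ih =>
    simp only [List.foldl_cons, List.any_cons, ih]
    by_cases hx : P x <;> simp [hx]

theorem any_range_iff_any_nbrs (nbrs : List Int) (i : Nat) :
    (((List.range (i + 1)).map (fun (k : Nat) => (k : Int))).any
        (fun v => decide (v ≠ (i : Int) - 1 ∧ v ∈ nbrs)))
      = nbrs.any (fun w => decide (0 ≤ w) && decide (w ≤ (i : Int)) && decide (w ≠ (i : Int) - 1)) := by
  rw [Bool.eq_iff_iff]
  simp only [List.any_eq_true, List.mem_map, List.mem_range, decide_eq_true_eq, Bool.and_eq_true]
  constructor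
  · rintro ⟨v, ⟨k, hk, rfl⟩, hne, hmem⟩
    exact ⟨(k : Int), hmem, ⟨⟨by omega, by omega⟩, hne⟩⟩
  · rintro ⟨w, hw, ⟨⟨h0, hle⟩, hne⟩⟩
    exact ⟨w, ⟨w.toNat, by omega, by omega⟩, hne, hw⟩

theorem add_range (i : Nat) :
    PySem.Set.add ((List.range i).map (fun (k : Nat) => (k : Int))) (i : Int)
      = (List.range (i + 1)).map (fun (k : Nat) => (k : Int)) := by
  have hni : ¬ ((i : Int) ∈ (List.range i).map (fun (k : Nat) => (k : Int))) := by
    simp only [List.mem_map, List.mem_range]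
    rintro ⟨k, hk, he⟩
    omega
  rw [List.range_succ, List.map_append]
  simp [PySem.Set.add, PySem.Set.contains, hni]

theorem pyALoop_eq_pyBGo (rest graph : List (List Int)) (i : Nat)
    (hdrop : graph.drop i = rest) :
    pyALoop graph ((List.range i).map (fun (k : Nat) => (k : Int))) (-1) ((i : Int) - 1) i
      = pyBGo rest i := by
  induction rest generalizing i with
  | nil =>
    have hlen : ¬ i < graph.length := by
      intro h
      have := List.drop_eq_nil_iff.mp hdrop
      omega
    rw [pyALoop, pyBGo]
    simp [hlen]
  | cons nbrs rest' ih =>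
    have hlen : i < graph.length := by
      by_contra h
      rw [List.drop_eq_nil_of_le (by omega)] at hdrop
      simp at hdrop
    rw [List.drop_eq_getElem_cons hlen] at hdrop
    injection hdrop with hget hdrop'
    have hgetD : graph.getD i [] = nbrs := by
      rw [List.getD_eq_getElem?_getD, List.getElem?_eq_getElem hlen, hget]
      rfl
    rw [pyALoop]
    simp only [hlen, true_and, dif_pos (by norm_num : (-1 : Int) < 0)]
    rw [add_range]
    have hin : pyAInner graph i ((i : Int) - 1) ((List.range (i + 1)).map (fun (k : Nat) => (k : Int))) (-1)
        = if nbrs.any (fun w => decide (0 ≤ w) && decide (w ≤ (i : Int)) && decide (w ≠ (i : Int) - 1)) then (i : Int) else -1 := by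
      unfold pyAInner
      rw [hgetD]
      rw [foldl_if_any (P := fun v => v ≠ (i : Int) - 1 ∧ v ∈ nbrs)]
      rw [any_range_iff_any_nbrs]
    rw [hin, pyBGo]
    by_cases hc : nbrs.any (fun w => decide (0 ≤ w) && decide (w ≤ (i : Int)) && decide (w ≠ (i : Int) - 1)) = true
    · rw [if_pos hc, if_pos hc]
      rw [pyALoop]
      have hstop : ¬ ((i + 1 < graph.length) ∧ ((i : Int) < 0)) := by
        rintro ⟨_, h⟩
        omega
      simp [hstop]
    · rw [if_neg hc, if_neg hc]
      have := ih (i + 1) hdrop'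
      rw [← this]
      norm_num

-- ===== VERDICT (by name: the statement is the Claim_ definition above) =====
theorem find_border_cycle_spec : Claim_equal_find_border_cycle := by
  intro graph _
  unfold Spec_find_border_cycle find_border_cycle find_border_cycle_alt
  have := pyALoop_eq_pyBGo graph graph 0 (by simp)
  simpa using this
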